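-- pv_equiv track=rewrite | github.com/jonathantsang/CompetitiveProgramming | codeforces/c645/b/b.py | solve
-- ===== SOURCE A (Python) =====
-- from collections import Counter
--
-- def solve(N, arr):
-- 	amt = 1
-- 	newamt = 0
-- 	arr.sort()
-- 	i = 0
-- 	count = Counter(arr)
-- 	seen = set()
-- 	for v in arr:
-- 		if v in seen:
-- 			continue
-- 		seen.add(v)
-- 		if amt + newamt + (count[v]-1) >= v: # minus 1 since can't see self
-- 			amt += count[v] + newamt
-- 			newamt = 0
-- 		else:
-- 			newamt += count[v]
-- 	return amt
-- ===== SOURCE B (Python) =====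
-- def solve(N, arr):
--     arr.sort()
--     best = 0
--     for i, v in enumerate(arr):
--         if v <= i + 1:
--             best = i + 1
--     return 1 + best
-- ===== Notes on version B (the rewrite author's own statement) =====
-- stated objective: simpler
-- what changed: Replaces A's Counter, seen-set and (amt, newamt) accumulation with a closed form: since amt+newamt always equals 1 + number of elements processed, the answer is 1 plus the last i+1 with sorted(arr)[i] <= i+1, computed by one trivial indexed pass; both sort arr in place, so the caller-visible mutation is identical.
import Mathlib
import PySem

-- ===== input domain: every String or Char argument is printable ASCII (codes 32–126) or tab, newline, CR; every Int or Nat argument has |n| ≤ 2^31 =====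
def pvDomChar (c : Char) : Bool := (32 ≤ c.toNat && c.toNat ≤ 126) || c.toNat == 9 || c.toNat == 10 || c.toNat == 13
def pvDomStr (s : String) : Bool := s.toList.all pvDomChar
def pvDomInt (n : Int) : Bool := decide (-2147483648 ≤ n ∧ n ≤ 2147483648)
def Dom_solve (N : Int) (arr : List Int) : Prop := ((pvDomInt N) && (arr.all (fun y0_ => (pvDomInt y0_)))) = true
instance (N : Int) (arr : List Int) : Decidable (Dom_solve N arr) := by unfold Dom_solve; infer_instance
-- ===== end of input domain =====

-- B drops the Counter/seen/newamt accumulation entirely: since amt+newamt is always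
-- 1 + (#elements processed), the answer is 1 + the last i+1 with sorted(arr)[i] <= i+1
-- (simpler). Both A and B sort arr in place; the equivalence is about the return value.

-- ===== PORT A =====
-- loop body of A's for-loop (state = (amt, newamt, seen))
def solveStep (count : PySem.Dict Int Int) (st : Int × Int × PySem.Set Int) (v : Int) :
    Int × Int × PySem.Set Int :=
  if v ∈ st.2.2 then st
  else
    let seen := st.2.2.add v
    if st.1 + st.2.1 + (count.getD v 0 - 1) ≥ v then (st.1 + count.getD v 0 + st.2.1, 0, seen)
    else (st.1, st.2.1 + count.getD v 0, seen)

def solve (N : Int) (arr : List Int) : Int :=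
  let s := PySem.List.sorted arr (fun x => x) false
  let count := PySem.Dict.counter s
  (s.foldl (solveStep count) (1, 0, PySem.Set.empty)).1

-- ===== PORT B =====
-- Source B: for i, v in enumerate(arr): if v <= i + 1: best = i + 1; return 1 + best
def solve_alt (N : Int) (arr : List Int) : Int :=
  let s := PySem.List.sorted arr (fun x => x) false
  1 + (PySem.List.enumerate s 0).foldl
        (fun b (p : Int × Int) => if p.2 ≤ p.1 + 1 then p.1 + 1 else b) 0

-- ===== PRECONDITION & SPEC =====
def Spec_solve (N : Int) (arr : List Int) (out : Int) : Prop := out = solve_alt N arr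
instance (N : Int) (arr : List Int) (out : Int) : Decidable (Spec_solve N arr out) := by unfold Spec_solve; infer_instance

-- ===== CLAIM (what is proved, stated in full; the proofs are below) =====
def Claim_equal_solve : Prop := ∀ (N : Int) (arr : List Int), Dom_solve N arr → Spec_solve N arr (solve N arr)

-- ===== LEMMAS AND PROOFS =====

-- proof-only intermediate: A's loop rewritten as a run scan over the sorted list
def solveAltLoop (amt newamt : Int) (l : List Int) : Int :=
  match l with
  | [] => amt
  | v :: t =>
      let run := t.takeWhile (fun x => x == v)
      let rest := t.dropWhile (fun x => x == v)
      let cnt : Int := 1 + run.length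
      if amt + newamt + cnt - 1 ≥ v then solveAltLoop (amt + cnt + newamt) 0 rest
      else solveAltLoop amt (newamt + cnt) rest
termination_by l.length
decreasing_by
  all_goals exact Nat.lt_succ_of_le (List.length_dropWhile_le _ _)

-- proof-only intermediate: B's per-element assignment loop (cur = i+1, b = 1+best)
def bestLoop (cur b : Int) (l : List Int) : Int :=
  match l with
  | [] => b
  | v :: t => bestLoop (cur + 1) (if v ≤ cur then cur + 1 else b) t

theorem foldl_const_of_step_id {α β : Type} (f : β → α → β) (st : β) (l : List α)
    (h : ∀ x ∈ l, f st x = st) : l.foldl f st = st := by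
  induction l with
  | nil => rfl
  | cons x t ih =>
      simp only [List.foldl_cons, h x (by simp)]
      exact ih (fun y hy => h y (by simp [hy]))

theorem not_mem_dropWhile_beq (v : Int) (t : List Int) (ht : t.Pairwise (· ≤ ·))
    (hvt : ∀ w ∈ t, v ≤ w) : v ∉ t.dropWhile (fun x => x == v) := by
  induction t with
  | nil => simp
  | cons h rs ih =>
      rw [List.dropWhile_cons]
      rcases List.pairwise_cons.mp ht with ⟨hh, ht'⟩
      by_cases hb : h = v
      · subst hb
        simp only [beq_self_eq_true, if_true]
        exact ih ht' hh
      · rw [beq_eq_false_iff_ne.mpr hb]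
        simp only [Bool.false_eq_true, if_false]
        intro hv
        rcases List.mem_cons.mp hv with h1 | h2
        · exact hb h1.symm
        · exact hb (le_antisymm (hh v h2) (hvt h (List.mem_cons_self)))

theorem run_facts (v : Int) (t : List Int) (hp : (v :: t).Pairwise (· ≤ ·)) :
    (∀ x ∈ t.takeWhile (fun x => x == v), x = v) ∧
    v ∉ t.dropWhile (fun x => x == v) ∧
    ((v :: t).count v = 1 + (t.takeWhile (fun x => x == v)).length) ∧
    (∀ w ∈ t.dropWhile (fun x => x == v),
      (v :: t).count w = (t.dropWhile (fun x => x == v)).count w) ∧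
    (t.dropWhile (fun x => x == v)).Pairwise (· ≤ ·) := by
  rcases List.pairwise_cons.mp hp with ⟨hvt, ht⟩
  have hrun : ∀ x ∈ t.takeWhile (fun x => x == v), x = v := by
    intro x hx
    have := List.mem_takeWhile_imp hx
    simpa using this
  have hvrest : v ∉ t.dropWhile (fun x => x == v) := not_mem_dropWhile_beq v t ht hvt
  have hteq : t.takeWhile (fun x => x == v) ++ t.dropWhile (fun x => x == v) = t :=
    List.takeWhile_append_dropWhile
  have hcnt_run : (t.takeWhile (fun x => x == v)).count v = (t.takeWhile (fun x => x == v)).length :=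
    List.count_eq_length.mpr (fun b hb => (hrun b hb).symm)
  refine ⟨hrun, hvrest, ?_, ?_, ?_⟩
  · have h1 := congrArg (List.count v) hteq
    rw [List.count_append, hcnt_run, List.count_eq_zero.mpr hvrest] at h1
    rw [List.count_cons_self, ← h1]
    omega
  · intro w hw
    have hwv : w ≠ v := fun h => hvrest (h ▸ hw)
    have hwrun : w ∉ t.takeWhile (fun x => x == v) := fun h => hwv (hrun w h)
    have h2 := congrArg (List.count w) hteq
    rw [List.count_append, List.count_eq_zero.mpr hwrun] at h2
    rw [List.count_cons_of_ne (Ne.symm hwv), ← h2]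
    omega
  · exact ht.sublist (List.dropWhile_sublist _)

theorem loopA_eq_alt (d : PySem.Dict Int Int) :
    ∀ (amt newamt : Int) (l : List Int) (seen : PySem.Set Int),
    l.Pairwise (· ≤ ·) → (∀ w ∈ l, w ∉ seen) →
    (∀ w ∈ l, d.getD w 0 = (l.count w : Int)) →
    (l.foldl (solveStep d) (amt, newamt, seen)).1 = solveAltLoop amt newamt l := by
  intro amt newamt l
  induction amt, newamt, l using solveAltLoop.induct with
  | case1 amt newamt =>
      intro seen _ _ _
      simp [solveAltLoop]
  | case2 amt newamt v t run rest cnt hcond ih =>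
      intro seen hp hs hd
      obtain ⟨hrun, hvrest, hcount, hcrest, hprest⟩ := run_facts v t hp
      have hcond' : amt + newamt + (1 + ((t.takeWhile (fun x => x == v)).length : Int)) - 1 ≥ v := hcond
      have hc : d.getD v 0 = 1 + ((t.takeWhile (fun x => x == v)).length : Int) := by
        rw [hd v (by simp), hcount]; push_cast; ring
      have hstep : solveStep d (amt, newamt, seen) v
          = (amt + d.getD v 0 + newamt, 0, seen.add v) := by
        unfold solveStep
        rw [if_neg (hs v (by simp))]
        simp only
        rw [if_pos (by rw [hc]; omega)]
      have hconst : (t.takeWhile (fun x => x == v)).foldl (solveStep d)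
          (amt + d.getD v 0 + newamt, 0, seen.add v)
          = (amt + d.getD v 0 + newamt, 0, seen.add v) := by
        apply foldl_const_of_step_id
        intro x hx
        rw [hrun x hx]
        unfold solveStep
        rw [if_pos ((PySem.Set.mem_add _ _ _).mpr (Or.inr rfl))]
      have hteq : t.takeWhile (fun x => x == v) ++ t.dropWhile (fun x => x == v) = t :=
        List.takeWhile_append_dropWhile
      have hsplit : t.foldl (solveStep d) (amt + d.getD v 0 + newamt, 0, seen.add v)
          = ((t.takeWhile (fun x => x == v)) ++ (t.dropWhile (fun x => x == v))).foldl
              (solveStep d) (amt + d.getD v 0 + newamt, 0, seen.add v) := by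
        rw [hteq]
      rw [List.foldl_cons, hstep, hsplit, List.foldl_append, hconst]
      have hih := ih (seen.add v) hprest
        (by
          intro w hw hmem
          have hw' : w ∈ List.dropWhile (fun x => x == v) t := hw
          have hwt : w ∈ t := (List.dropWhile_sublist _).subset hw'
          rcases (PySem.Set.mem_add _ _ _).mp hmem with h1 | h2
          · exact hs w (List.mem_cons_of_mem v hwt) h1
          · exact hvrest (h2 ▸ hw'))
        (by
          intro w hw
          have hw' : w ∈ List.dropWhile (fun x => x == v) t := hw
          have hwt : w ∈ t := (List.dropWhile_sublist _).subset hw'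
          rw [hd w (List.mem_cons_of_mem v hwt), hcrest w hw'])
      simp only [solveAltLoop]
      rw [if_pos hcond', hc]
      exact hih
  | case3 amt newamt v t run rest cnt hcond ih =>
      intro seen hp hs hd
      obtain ⟨hrun, hvrest, hcount, hcrest, hprest⟩ := run_facts v t hp
      have hcond' : ¬ (amt + newamt + (1 + ((t.takeWhile (fun x => x == v)).length : Int)) - 1 ≥ v) := hcond
      have hc : d.getD v 0 = 1 + ((t.takeWhile (fun x => x == v)).length : Int) := by
        rw [hd v (by simp), hcount]; push_cast; ring
      have hstep : solveStep d (amt, newamt, seen) v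
          = (amt, newamt + d.getD v 0, seen.add v) := by
        unfold solveStep
        rw [if_neg (hs v (by simp))]
        simp only
        rw [if_neg (by rw [hc]; omega)]
      have hconst : (t.takeWhile (fun x => x == v)).foldl (solveStep d)
          (amt, newamt + d.getD v 0, seen.add v)
          = (amt, newamt + d.getD v 0, seen.add v) := by
        apply foldl_const_of_step_id
        intro x hx
        rw [hrun x hx]
        unfold solveStep
        rw [if_pos ((PySem.Set.mem_add _ _ _).mpr (Or.inr rfl))]
      have hteq : t.takeWhile (fun x => x == v) ++ t.dropWhile (fun x => x == v) = t :=
        List.takeWhile_append_dropWhile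
      have hsplit : t.foldl (solveStep d) (amt, newamt + d.getD v 0, seen.add v)
          = ((t.takeWhile (fun x => x == v)) ++ (t.dropWhile (fun x => x == v))).foldl
              (solveStep d) (amt, newamt + d.getD v 0, seen.add v) := by
        rw [hteq]
      rw [List.foldl_cons, hstep, hsplit, List.foldl_append, hconst]
      have hih := ih (seen.add v) hprest
        (by
          intro w hw hmem
          have hw' : w ∈ List.dropWhile (fun x => x == v) t := hw
          have hwt : w ∈ t := (List.dropWhile_sublist _).subset hw'
          rcases (PySem.Set.mem_add _ _ _).mp hmem with h1 | h2
          · exact hs w (List.mem_cons_of_mem v hwt) h1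
          · exact hvrest (h2 ▸ hw'))
        (by
          intro w hw
          have hw' : w ∈ List.dropWhile (fun x => x == v) t := hw
          have hwt : w ∈ t := (List.dropWhile_sublist _).subset hw'
          rw [hd w (List.mem_cons_of_mem v hwt), hcrest w hw'])
      simp only [solveAltLoop]
      rw [if_neg hcond', hc]
      exact hih

theorem bestLoop_append (xs ys : List Int) :
    ∀ (cur b : Int),
    bestLoop cur b (xs ++ ys) = bestLoop (cur + xs.length) (bestLoop cur b xs) ys := by
  induction xs with
  | nil => intro cur b; simp [bestLoop]
  | cons x t ih =>
      intro cur b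
      simp only [List.cons_append, bestLoop, ih, List.length_cons]
      congr 1
      push_cast
      ring

theorem bestLoop_run (v : Int) (run : List Int) (h : ∀ x ∈ run, x = v) :
    ∀ (cur b : Int),
    bestLoop cur b (v :: run) =
      if v ≤ cur + (run.length : Int) then cur + (run.length : Int) + 1 else b := by
  induction run with
  | nil => intro cur b; simp [bestLoop]
  | cons x t ih =>
      intro cur b
      have hx : x = v := h x (by simp)
      have ht : ∀ y ∈ t, y = v := fun y hy => h y (by simp [hy])
      have h1 : bestLoop cur b (v :: x :: t)
          = bestLoop (cur + 1) (if v ≤ cur then cur + 1 else b) (v :: t) := by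
        simp only [bestLoop, hx]
      rw [h1, ih ht]
      simp only [List.length_cons]
      push_cast
      split_ifs <;> omega

theorem alt_eq_best :
    ∀ (amt newamt : Int) (l : List Int),
    solveAltLoop amt newamt l = bestLoop (amt + newamt) amt l := by
  intro amt newamt l
  induction amt, newamt, l using solveAltLoop.induct with
  | case1 amt newamt => simp [solveAltLoop, bestLoop]
  | case2 amt newamt v t run rest cnt hcond ih =>
      have hteq : t.takeWhile (fun x => x == v) ++ t.dropWhile (fun x => x == v) = t :=
        List.takeWhile_append_dropWhile
      have hrun : ∀ x ∈ t.takeWhile (fun x => x == v), x = v := by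
        intro x hx; simpa using List.mem_takeWhile_imp hx
      have hcond' : amt + newamt + (1 + ((t.takeWhile (fun x => x == v)).length : Int)) - 1 ≥ v := hcond
      have hl : v :: t = (v :: t.takeWhile (fun x => x == v)) ++ t.dropWhile (fun x => x == v) := by
        rw [List.cons_append, hteq]
      have hcnt : cnt = 1 + ((t.takeWhile (fun x => x == v)).length : Int) := rfl
      have hlen : (((v :: t.takeWhile (fun x => x == v)).length : Nat) : Int)
          = 1 + ((t.takeWhile (fun x => x == v)).length : Int) := by
        push_cast [List.length_cons]; ring
      have hrst : t.dropWhile (fun x => x == v) = rest := rfl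
      simp only [solveAltLoop]
      rw [if_pos hcond', ih, hl, bestLoop_append, bestLoop_run v _ hrun, hrst]
      rw [if_pos (by omega)]
      have c1 : amt + newamt + (((v :: t.takeWhile (fun x => x == v)).length : Nat) : Int)
          = amt + cnt + newamt + 0 := by omega
      have c2 : amt + newamt + ((t.takeWhile (fun x => x == v)).length : Int) + 1
          = amt + cnt + newamt := by omega
      rw [c1, c2]
  | case3 amt newamt v t run rest cnt hcond ih =>
      have hteq : t.takeWhile (fun x => x == v) ++ t.dropWhile (fun x => x == v) = t :=
        List.takeWhile_append_dropWhile
      have hrun : ∀ x ∈ t.takeWhile (fun x => x == v), x = v := by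
        intro x hx; simpa using List.mem_takeWhile_imp hx
      have hcond' : ¬ (amt + newamt + (1 + ((t.takeWhile (fun x => x == v)).length : Int)) - 1 ≥ v) := hcond
      have hl : v :: t = (v :: t.takeWhile (fun x => x == v)) ++ t.dropWhile (fun x => x == v) := by
        rw [List.cons_append, hteq]
      have hcnt : cnt = 1 + ((t.takeWhile (fun x => x == v)).length : Int) := rfl
      have hlen : (((v :: t.takeWhile (fun x => x == v)).length : Nat) : Int)
          = 1 + ((t.takeWhile (fun x => x == v)).length : Int) := by
        push_cast [List.length_cons]; ring
      have hrst : t.dropWhile (fun x => x == v) = rest := rfl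
      simp only [solveAltLoop]
      rw [if_neg hcond', ih, hl, bestLoop_append, bestLoop_run v _ hrun, hrst]
      rw [if_neg (by omega)]
      have c1 : amt + newamt + (((v :: t.takeWhile (fun x => x == v)).length : Nat) : Int)
          = amt + (newamt + cnt) := by omega
      rw [c1]

theorem enum_fold_eq_bestLoop :
    ∀ (l : List Int) (j b : Int),
    bestLoop (j + 1) (b + 1) l
      = 1 + (PySem.List.enumerate l j).foldl
          (fun b (p : Int × Int) => if p.2 ≤ p.1 + 1 then p.1 + 1 else b) b := by
  intro l
  induction l with
  | nil => intro j b; simp [bestLoop, PySem.List.enumerate_nil]; ring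
  | cons v t ih =>
      intro j b
      rw [PySem.List.enumerate_cons, List.foldl_cons]
      simp only [bestLoop]
      have : (if v ≤ j + 1 then j + 1 + 1 else b + 1)
          = (if v ≤ j + 1 then j + 1 else b) + 1 := by split_ifs <;> ring
      rw [this, ih]

-- ===== VERDICT (by name: the statement is the Claim_ definition above) =====
theorem solve_spec : Claim_equal_solve := by
  intro N arr _
  unfold Spec_solve solve solve_alt
  simp only
  rw [loopA_eq_alt _ _ _ _ _
    (by simpa using PySem.List.sorted_pairwise arr (fun x => x))
    (by simp [PySem.Set.empty])
    (by intro w _; exact PySem.Dict.getD_counter _ _)]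
  rw [alt_eq_best]
  have h := enum_fold_eq_bestLoop (PySem.List.sorted arr (fun x => x) false) 0 0
  simpa using h
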